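-- pv_equiv track=rewrite | github.com/ucfcbb/RNAMotifContrast | src/scripts/prepare_loops.py | has_complete_ATOM_portion
-- ===== SOURCE A (Python) =====
-- def has_complete_ATOM_portion(lines):
--     is_complete = False
--     in_section = False
--     for line in lines:
--         if line.startswith('ATOM') or line.startswith('HETATM'):
--             in_section = True
--         elif line.startswith('#') and in_section == True:
--             is_complete = True
--             break
--
--     return is_complete
-- ===== SOURCE B (Python) =====
-- def has_complete_ATOM_portion(lines):
--     lines = list(lines)
--     markers = [i for i, l in enumerate(lines)
--                if l.startswith('ATOM') or l.startswith('HETATM')]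
--     hashes = [i for i, l in enumerate(lines) if l.startswith('#')]
--     return bool(markers) and bool(hashes) and markers[0] < hashes[-1]
-- ===== Notes on version B (the rewrite author's own statement) =====
-- stated objective: alternative
-- what changed: Replaced the sequential state-machine (in_section flag with early break) by an index-based formulation: build the list of positions of ATOM/HETATM lines and of '#' lines, and return true iff the first marker position is smaller than the last '#' position.
import Mathlib
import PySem

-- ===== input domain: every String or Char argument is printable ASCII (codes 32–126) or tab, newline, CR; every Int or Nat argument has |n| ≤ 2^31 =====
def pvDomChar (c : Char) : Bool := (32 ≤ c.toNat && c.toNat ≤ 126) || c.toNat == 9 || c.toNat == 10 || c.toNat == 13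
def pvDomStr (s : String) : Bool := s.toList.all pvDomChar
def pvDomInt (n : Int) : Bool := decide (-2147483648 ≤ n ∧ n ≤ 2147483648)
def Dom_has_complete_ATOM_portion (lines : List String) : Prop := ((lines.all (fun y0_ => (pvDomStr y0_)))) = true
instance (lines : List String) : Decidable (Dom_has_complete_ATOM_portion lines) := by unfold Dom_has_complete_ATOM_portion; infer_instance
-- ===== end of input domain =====

-- ===== PORT A =====
-- Honest line: B replaces A's in_section state machine by comparing the first ATOM/HETATM index with the last '#' index (alternative formulation, same cost).
def hcapLoop (lines : List String) (in_section : Bool) : Bool :=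
  match lines with
  | [] => false
  | line :: rest =>
    if PySem.Str.startswith line "ATOM" || PySem.Str.startswith line "HETATM" then
      hcapLoop rest true
    else if PySem.Str.startswith line "#" && in_section then
      true
    else
      hcapLoop rest in_section

def has_complete_ATOM_portion (lines : List String) : Bool := hcapLoop lines false

-- ===== PORT B =====
def pvIsMarker (l : String) : Bool :=
  PySem.Str.startswith l "ATOM" || PySem.Str.startswith l "HETATM"

def pvIsHash (l : String) : Bool := PySem.Str.startswith l "#"

-- [i for i, l in enumerate(lines) if isMarker(l)], generalized over enumerate's start
def pvMarkerIdxs (lines : List String) (s : Int) : List Int :=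
  ((PySem.List.enumerate lines s).filter (fun p => pvIsMarker p.2)).map (·.1)

-- [i for i, l in enumerate(lines) if l.startswith('#')]
def pvHashIdxs (lines : List String) (s : Int) : List Int :=
  ((PySem.List.enumerate lines s).filter (fun p => pvIsHash p.2)).map (·.1)

def has_complete_ATOM_portion_alt (lines : List String) : Bool :=
  let markers := pvMarkerIdxs lines 0
  let hashes := pvHashIdxs lines 0
  match markers.head?, hashes.getLast? with        -- markers[0], hashes[-1]
  | some m, some h => decide (m < h)
  | _, _ => false

-- ===== PRECONDITION & SPEC =====
def Spec_has_complete_ATOM_portion (lines : List String) (out : Bool) : Prop := out = has_complete_ATOM_portion_alt lines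
instance (lines : List String) (out : Bool) : Decidable (Spec_has_complete_ATOM_portion lines out) := by unfold Spec_has_complete_ATOM_portion; infer_instance

-- ===== CLAIM (what is proved, stated in full; the proofs are below) =====
def Claim_equal_has_complete_ATOM_portion : Prop := ∀ (lines : List String), Dom_has_complete_ATOM_portion lines → Spec_has_complete_ATOM_portion lines (has_complete_ATOM_portion lines)

-- ===== LEMMAS AND PROOFS =====

-- B's core, generalized over the enumerate start
def pvCore (lines : List String) (s : Int) : Bool :=
  match (pvMarkerIdxs lines s).head?, (pvHashIdxs lines s).getLast? with
  | some m, some h => decide (m < h)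
  | _, _ => false

-- fold A's inline tests into the named predicates (definitional)
theorem fold_marker (l : String) :
    (PySem.Str.startswith l "ATOM" || PySem.Str.startswith l "HETATM") = pvIsMarker l := rfl

theorem fold_hash (l : String) : PySem.Str.startswith l "#" = pvIsHash l := rfl

-- a line starting with "ATOM" or "HETATM" does not start with "#"
theorem ns_of_marker (l : String) (h : pvIsMarker l = true) : pvIsHash l = false := by
  unfold pvIsMarker at h
  unfold pvIsHash
  simp only [PySem.Str.startswith_eq, Bool.or_eq_true, PySem.Chars.startswith_iff] at h ⊢
  rw [Bool.eq_false_iff]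
  intro hp
  rw [PySem.Chars.startswith_iff] at hp
  obtain ⟨t, ht⟩ := hp
  rcases h with ⟨u, hu⟩ | ⟨u, hu⟩ <;> rw [← ht] at hu <;> simp at hu

theorem markerIdxs_cons (x : String) (xs : List String) (s : Int) :
    pvMarkerIdxs (x :: xs) s =
      if pvIsMarker x then s :: pvMarkerIdxs xs (s + 1) else pvMarkerIdxs xs (s + 1) := by
  unfold pvMarkerIdxs
  rw [PySem.List.enumerate_cons, List.filter_cons]
  split_ifs with h <;> simp

theorem hashIdxs_cons (x : String) (xs : List String) (s : Int) :
    pvHashIdxs (x :: xs) s =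
      if pvIsHash x then s :: pvHashIdxs xs (s + 1) else pvHashIdxs xs (s + 1) := by
  unfold pvHashIdxs
  rw [PySem.List.enumerate_cons, List.filter_cons]
  split_ifs with h <;> simp

-- every collected index is ≥ the start
theorem hashIdxs_lb (xs : List String) (s : Int) : ∀ i ∈ pvHashIdxs xs s, s ≤ i := by
  induction xs generalizing s with
  | nil => intro i hi; simp [pvHashIdxs, PySem.List.enumerate_nil] at hi
  | cons x xs ih =>
    intro i hi
    rw [hashIdxs_cons] at hi
    split_ifs at hi with h
    · rcases List.mem_cons.mp hi with rfl | hi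
      · exact le_refl _
      · linarith [ih (s + 1) i hi]
    · linarith [ih (s + 1) i hi]

theorem markerIdxs_lb (xs : List String) (s : Int) : ∀ i ∈ pvMarkerIdxs xs s, s ≤ i := by
  induction xs generalizing s with
  | nil => intro i hi; simp [pvMarkerIdxs, PySem.List.enumerate_nil] at hi
  | cons x xs ih =>
    intro i hi
    rw [markerIdxs_cons] at hi
    split_ifs at hi with h
    · rcases List.mem_cons.mp hi with rfl | hi
      · exact le_refl _
      · linarith [ih (s + 1) i hi]
    · linarith [ih (s + 1) i hi]

-- nonemptiness of the hash-index list = some '#' line exists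
theorem hashIdxs_any (xs : List String) (s : Int) :
    (pvHashIdxs xs s).getLast?.isSome = xs.any pvIsHash := by
  induction xs generalizing s with
  | nil => simp [pvHashIdxs, PySem.List.enumerate_nil]
  | cons x xs ih =>
    rw [hashIdxs_cons, List.any_cons]
    split_ifs with h
    · cases hl : (pvHashIdxs xs (s + 1)).getLast? with
      | none => simp [h, List.getLast?_cons, hl]
      | some v => simp [h, List.getLast?_cons, hl]
    · rw [ih]
      simp [h]

-- once in the section, A's loop is just 'any remaining line starts with #'
theorem hcapLoop_true (lines : List String) :
    hcapLoop lines true = lines.any pvIsHash := by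
  induction lines with
  | nil => rfl
  | cons line rest ih =>
    rw [hcapLoop, fold_marker, fold_hash, List.any_cons]
    by_cases h : pvIsMarker line = true
    · rw [if_pos h, ih, ns_of_marker line h, Bool.false_or]
    · rw [if_neg h, Bool.and_true]
      by_cases h2 : pvIsHash line = true
      · rw [if_pos h2, h2, Bool.true_or]
      · rw [if_neg h2, ih, Bool.not_eq_true] at *
        rw [h2, Bool.false_or]

-- main invariant: B's core (at any start) computes A's loop with the flag off
theorem core_eq_loop (xs : List String) (s : Int) : pvCore xs s = hcapLoop xs false := by
  induction xs generalizing s with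
  | nil => rfl
  | cons x xs ih =>
    unfold pvCore
    rw [markerIdxs_cons, hashIdxs_cons, hcapLoop, fold_marker, fold_hash, Bool.and_false,
        if_neg (Bool.false_ne_true)]
    by_cases hm : pvIsMarker x = true
    · -- head is a marker: first marker index is s, answer = any '#' among the rest
      rw [if_pos hm, if_pos hm, if_neg (by simp [ns_of_marker x hm]),
          hcapLoop_true, ← hashIdxs_any xs (s + 1)]
      cases hl : (pvHashIdxs xs (s + 1)).getLast? with
      | none => simp
      | some h =>
        have : s + 1 ≤ h := hashIdxs_lb xs (s + 1) h (List.mem_of_getLast? hl)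
        simp [List.head?_cons]
        omega
    · rw [if_neg hm, if_neg hm, ← ih (s + 1)]
      unfold pvCore
      by_cases hh : pvIsHash x = true
      · -- head is '#' but no marker seen yet: first marker (if any) is ≥ s+1 > s
        rw [if_pos hh]
        cases hmk : (pvMarkerIdxs xs (s + 1)).head? with
        | none => simp
        | some m =>
          have hm1 : s + 1 ≤ m :=
            markerIdxs_lb xs (s + 1) m (List.mem_of_mem_head? hmk)
          cases hE : pvHashIdxs xs (s + 1) with
          | nil => simp [List.getLast?_cons]; omega
          | cons a l => simp [List.getLast?_cons]
      · rw [if_neg hh]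

-- ===== VERDICT =====
theorem has_complete_ATOM_portion_spec : Claim_equal_has_complete_ATOM_portion := by
  intro lines _
  unfold Spec_has_complete_ATOM_portion has_complete_ATOM_portion has_complete_ATOM_portion_alt
  exact (core_eq_loop lines 0).symm
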